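-- pv_equiv track=rewrite | github.com/SamSiew/StringSearchAlgorithm | q1/mirrored_boyermoore.py | buildR
-- ===== SOURCE A (Python) =====
-- def buildR(pattern):
--     """
--     build R array from pattern
--     :param pattern: string represent pattern
--     :return: 2d array which for rightmost occurances in pattern in character of pattern
--     """
--     R = [[] for i in range(128)]
--     # at most (128*pattern) space and time will be used to allocate leftmost value.
--     for i in range(len(pattern)):
--         if len(R[ord(pattern[i])]) == 0:
--            R[ord(pattern[i])] = [0 for i in range(len(pattern))]
--         j = i
--         # each element of R will only accessed once and can be proven with average case.
--         # allocate the left side array with value on right.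
--         while j >= 0 and R[ord(pattern[i])][j] == 0:
--            R[ord(pattern[i])][j] = i + 1
--            j -= 1
--     return R
-- ===== SOURCE B (Python) =====
-- def buildR(pattern):
--     """
--     build R array from pattern
--     :param pattern: string represent pattern
--     :return: 2d array which for rightmost occurances in pattern in character of pattern
--     """
--     m = len(pattern)
--     R = []
--     for c in range(128):
--         if chr(c) in pattern:
--             arr = [0] * m
--             nearest = 0
--             for j in range(m - 1, -1, -1):
--                 if ord(pattern[j]) == c:
--                     nearest = j + 1
--                 arr[j] = nearest
--             R.append(arr)
--         else:
--             R.append([])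
--     return R
-- ===== Notes on version B (the rewrite author's own statement) =====
-- stated objective: faster
-- what changed: Replaces A's lazily allocated table with nested backward early-stopping while-loop fills by one right-to-left sweep per ASCII code that threads the 1-based index of the next matching position downward in a single pass.
import Mathlib
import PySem

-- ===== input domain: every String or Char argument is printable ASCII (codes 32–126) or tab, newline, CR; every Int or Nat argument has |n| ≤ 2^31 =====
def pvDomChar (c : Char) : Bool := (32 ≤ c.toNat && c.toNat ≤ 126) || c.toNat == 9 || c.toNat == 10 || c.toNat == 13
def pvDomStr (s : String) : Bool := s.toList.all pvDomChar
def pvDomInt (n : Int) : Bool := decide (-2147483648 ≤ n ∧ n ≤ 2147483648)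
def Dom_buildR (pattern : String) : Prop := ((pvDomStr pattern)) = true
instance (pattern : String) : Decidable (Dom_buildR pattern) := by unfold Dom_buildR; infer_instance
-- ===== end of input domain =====

-- B replaces A's nested leftward early-stopping fill by one right-to-left sweep per character
-- code that threads the next matching position downward (objective: faster, measured constant-factor).

-- ===== PORT A =====
-- ord(pattern[i]) for an in-range index i (every access in A is in range)
def pvChr (cs : List Char) (i : Nat) : Nat := (cs.getD i 'a').toNat

-- the inner 'while j >= 0 and R[...][j] == 0' loop; fuel k = j+1 encodes current j = k-1
def whileA : List Int → Int → Nat → List Int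
  | row, _, 0 => row
  | row, v, k+1 => if row.getD k 0 = 0 then whileA (row.set k v) v k else row

-- one iteration of A's outer 'for i in range(len(pattern))' loop
def buildRstep (cs : List Char) (m : Nat) (R : List (List Int)) (i : Nat) : List (List Int) :=
  let c := pvChr cs i
  let R1 := if (R.getD c []).length = 0 then R.set c (List.replicate m (0 : Int)) else R
  R1.set c (whileA (R1.getD c []) (Int.ofNat (i + 1)) (i + 1))

def buildR (pattern : String) : List (List Int) :=
  let cs := pattern.toList
  let m := cs.length
  (List.range m).foldl (buildRstep cs m) (List.replicate 128 [])

-- ===== PORT B =====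
-- right-to-left sweep: fuel k = next index to process is k-1; 'nearest' threaded downward
def sweepB (cs : List Char) (c : Nat) : Nat → Int → List Int → List Int
  | 0, _, acc => acc
  | k+1, nearest, acc =>
    let nearest' := if pvChr cs k = c then Int.ofNat (k + 1) else nearest
    sweepB cs c k nearest' (nearest' :: acc)

def buildR_alt (pattern : String) : List (List Int) :=
  let cs := pattern.toList
  (List.range 128).map (fun c =>
    if cs.any (fun ch => ch.toNat = c) then sweepB cs c cs.length 0 [] else [])

-- ===== PRECONDITION & SPEC =====
def Spec_buildR (pattern : String) (out : List (List Int)) : Prop := out = buildR_alt pattern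
instance (pattern : String) (out : List (List Int)) : Decidable (Spec_buildR pattern out) := by unfold Spec_buildR; infer_instance

-- ===== CLAIM (what is proved, stated in full; the proofs are below) =====
def Claim_equal_buildR : Prop := ∀ (pattern : String), Dom_buildR pattern → Spec_buildR pattern (buildR pattern)

-- ===== LEMMAS AND PROOFS =====

-- nearest occurrence of code c at an index in [j, t), as 1-based position (0 if none)
def nearT (cs : List Char) (c : Nat) (t j : Nat) : Int :=
  if j < t then (if pvChr cs j = c then Int.ofNat (j + 1) else nearT cs c t (j + 1)) else 0
termination_by t - j
decreasing_by omega

-- whether code c occurs at an index < t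
def occB (cs : List Char) (t c : Nat) : Bool := (List.range t).any (fun i => pvChr cs i = c)

-- the table after A has processed indices 0..t-1
def RT (cs : List Char) (t : Nat) : List (List Int) :=
  (List.range 128).map (fun c =>
    if occB cs t c then (List.range cs.length).map (nearT cs c t) else [])

lemma nearT_ge (cs : List Char) (c t j : Nat) (h : t ≤ j) : nearT cs c t j = 0 := by
  rw [nearT]; simp [Nat.not_lt.2 h]

lemma nearT_none (cs : List Char) (c t : Nat) (h : ∀ i, i < t → pvChr cs i ≠ c) :
    ∀ j, nearT cs c t j = 0 := by
  intro j
  by_cases hj : j < t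
  · rw [nearT]
    simp only [hj, if_true, h j hj, if_false]
    have : nearT cs c t (j + 1) = 0 := nearT_none cs c t h (j + 1)
    simpa using this
  · exact nearT_ge cs c t j (Nat.not_lt.1 hj)
termination_by j => t - j
decreasing_by omega

lemma nearT_succ_other (cs : List Char) (c t : Nat) (h : pvChr cs t ≠ c) :
    ∀ j, nearT cs c (t + 1) j = nearT cs c t j := by
  intro j
  by_cases hj : j < t
  · conv_lhs => rw [nearT]
    conv_rhs => rw [nearT]
    simp only [hj, Nat.lt_succ_of_lt hj, if_true]
    by_cases hc : pvChr cs j = c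
    · simp [hc]
    · simpa [hc] using nearT_succ_other cs c t h (j + 1)
  · by_cases hjt : j = t
    · subst hjt
      conv_lhs => rw [nearT]
      simp [h, nearT_ge cs c (j + 1) (j + 1) le_rfl, nearT_ge cs c j j le_rfl]
    · rw [nearT_ge cs c (t + 1) j (by omega), nearT_ge cs c t j (by omega)]
termination_by j => t - j
decreasing_by omega

lemma nearT_succ_zero (cs : List Char) (c t : Nat) (hc : pvChr cs t = c) :
    ∀ j, j ≤ t → nearT cs c t j = 0 → nearT cs c (t + 1) j = Int.ofNat (t + 1) := by
  intro j hj h0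
  by_cases hjt : j = t
  · subst hjt
    rw [nearT]
    simp [hc]
  · have hjlt : j < t := by omega
    rw [nearT] at h0
    simp only [hjlt, if_true] at h0
    by_cases hcj : pvChr cs j = c
    · simp [hcj] at h0; omega
    · simp only [hcj, if_false] at h0
      rw [nearT]
      simp only [Nat.lt_succ_of_lt hjlt, if_true, hcj, if_false]
      exact nearT_succ_zero cs c t hc (j + 1) (by omega) h0
termination_by j => t - j
decreasing_by omega

lemma nearT_succ_nonzero (cs : List Char) (c t : Nat) :
    ∀ j, nearT cs c t j ≠ 0 → nearT cs c (t + 1) j = nearT cs c t j := by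
  intro j hne
  by_cases hj : j < t
  · conv_lhs => rw [nearT]
    conv_rhs => rw [nearT]
    rw [nearT] at hne
    simp only [hj, if_true] at hne ⊢
    simp only [Nat.lt_succ_of_lt hj, if_true]
    by_cases hcj : pvChr cs j = c
    · simp [hcj]
    · simp only [hcj, if_false] at hne ⊢
      exact nearT_succ_nonzero cs c t (j + 1) hne
  · exact absurd (nearT_ge cs c t j (Nat.not_lt.1 hj)) hne
termination_by j => t - j
decreasing_by omega

lemma nearT_nonzero_mono (cs : List Char) (c t : Nat) :
    ∀ j k, j ≤ k → nearT cs c t k ≠ 0 → nearT cs c t j ≠ 0 := by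
  intro j k hjk hk
  by_cases hje : j = k
  · subst hje; exact hk
  · have hkt : k < t := by
      by_contra h; exact hk (nearT_ge cs c t k (Nat.not_lt.1 h))
    have hjt : j < t := by omega
    rw [nearT]
    simp only [hjt, if_true]
    by_cases hcj : pvChr cs j = c
    · simp [hcj]; omega
    · simp only [hcj, if_false]
      exact nearT_nonzero_mono cs c t (j + 1) k (by omega) hk
termination_by j k => k - j
decreasing_by omega

lemma getD_set_ne (l : List Int) (i j : Nat) (v : Int) (h : i ≠ j) :
    (l.set i v).getD j 0 = l.getD j 0 := by
  simp [List.getD, h]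

lemma getD_set_self (l : List Int) (i : Nat) (v : Int) (h : i < l.length) :
    (l.set i v).getD i 0 = v := by
  simp [List.getD, h]

-- the while loop turns a hybrid row (nearT t up to index k, nearT (t+1) above) into the full t+1 row
lemma whileA_spec (cs : List Char) (c t : Nat) (hc : pvChr cs t = c) (m : Nat) :
    ∀ k r, r.length = m → k ≤ t →
      (∀ j, j ≤ k → r.getD j 0 = nearT cs c t j) →
      (∀ j, k < j → j < m → r.getD j 0 = nearT cs c (t + 1) j) →
      whileA r (Int.ofNat (t + 1)) (k + 1) = (List.range m).map (nearT cs c (t + 1)) := by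
  intro k
  induction k with
  | zero =>
    intro r hlen hkt hlow hhigh
    rw [whileA]
    have h0 := hlow 0 le_rfl
    by_cases hz : nearT cs c t 0 = 0
    · rw [h0, if_pos hz, whileA]
      apply List.ext_getElem
      · simp [hlen]
      · intro j hj1 hj2
        simp only [List.getElem_map, List.getElem_range]
        have hjm : j < m := by simpa using hj2
        rw [← List.getD_eq_getElem (r.set 0 (Int.ofNat (t + 1))) 0
          (by simpa [hlen] using hjm)]
        by_cases hj0 : j = 0
        · subst hj0
          rw [getD_set_self r 0 _ (by omega), nearT_succ_zero cs c t hc 0 (by omega) hz]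
        · rw [getD_set_ne r 0 j _ (by omega), hhigh j (by omega) hjm]
    · rw [h0, if_neg hz]
      apply List.ext_getElem
      · simp [hlen]
      · intro j hj1 hj2
        simp only [List.getElem_map, List.getElem_range]
        have hjm : j < m := by simpa using hj2
        rw [← List.getD_eq_getElem r 0 (by omega)]
        by_cases hj0 : j = 0
        · subst hj0
          rw [h0, nearT_succ_nonzero cs c t 0 hz]
        · rw [hhigh j (by omega) hjm]
  | succ k ih =>
    intro r hlen hkt hlow hhigh
    rw [whileA]
    have hk1 := hlow (k + 1) le_rfl
    by_cases hz : nearT cs c t (k + 1) = 0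
    · rw [hk1, if_pos hz]
      apply ih (r.set (k + 1) (Int.ofNat (t + 1)))
      · simp [hlen]
      · omega
      · intro j hj
        rw [getD_set_ne r (k + 1) j _ (by omega)]
        exact hlow j (by omega)
      · intro j hj hjm
        by_cases hje : j = k + 1
        · subst hje
          rw [getD_set_self r (k + 1) _ (by omega),
            nearT_succ_zero cs c t hc (k + 1) (by omega) hz]
        · rw [getD_set_ne r (k + 1) j _ (by omega)]
          exact hhigh j (by omega) hjm
    · rw [hk1, if_neg hz]
      apply List.ext_getElem
      · simp [hlen]
      · intro j hj1 hj2
        simp only [List.getElem_map, List.getElem_range]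
        have hjm : j < m := by simpa using hj2
        rw [← List.getD_eq_getElem r 0 (by omega)]
        by_cases hjk : j ≤ k + 1
        · have hne : nearT cs c t j ≠ 0 := nearT_nonzero_mono cs c t j (k + 1) hjk hz
          rw [hlow j hjk, nearT_succ_nonzero cs c t j hne]
        · rw [hhigh j (by omega) hjm]

lemma occB_succ (cs : List Char) (t c : Nat) :
    occB cs (t + 1) c = (occB cs t c || decide (pvChr cs t = c)) := by
  simp [occB, List.range_succ]

lemma getD_RT (cs : List Char) (t c : Nat) (hc : c < 128) :
    (RT cs t).getD c [] = if occB cs t c then (List.range cs.length).map (nearT cs c t) else [] := by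
  rw [RT, List.getD_eq_getElem _ _ (by simpa using hc)]
  simp

lemma RT_zero (cs : List Char) : RT cs 0 = List.replicate 128 [] := by
  apply List.ext_getElem
  · simp [RT]
  · intro j hj1 hj2
    simp [RT, occB]

-- one outer iteration advances RT t to RT (t+1)
lemma step_RT (cs : List Char) (t : Nat) (htm : t < cs.length) (hlt : pvChr cs t < 128) :
    buildRstep cs cs.length (RT cs t) t = RT cs (t + 1) := by
  set c0 := pvChr cs t with hc0
  have hlenRT : (RT cs t).length = 128 := by simp [RT]
  have hrow : (if ((RT cs t).getD c0 []).length = 0 then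
      (RT cs t).set c0 (List.replicate cs.length (0 : Int)) else RT cs t).getD c0 [] =
      (List.range cs.length).map (nearT cs c0 t) := by
    by_cases hocc : occB cs t c0 = true
    · have hcond : ¬ ((RT cs t).getD c0 []).length = 0 := by
        rw [getD_RT cs t c0 hlt, if_pos hocc]
        simp only [List.length_map, List.length_range]
        omega
      rw [if_neg hcond, getD_RT cs t c0 hlt, if_pos hocc]
    · have hz : ∀ j, nearT cs c0 t j = 0 := by
        apply nearT_none
        intro i hi hci
        apply hocc
        simp only [occB, List.any_eq_true, List.mem_range, decide_eq_true_eq]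
        exact ⟨i, hi, hci⟩
      have hcond : ((RT cs t).getD c0 []).length = 0 := by
        rw [getD_RT cs t c0 hlt]
        simp [hocc]
      rw [if_pos hcond,
        List.getD_eq_getElem _ _ (show c0 < ((RT cs t).set c0 _).length by simp [hlenRT, hlt]),
        List.getElem_set_self]
      apply List.ext_getElem
      · simp
      · intro j hj1 hj2
        simp [hz]
  have hset : ∀ (x : List Int),
      (if ((RT cs t).getD c0 []).length = 0 then
        (RT cs t).set c0 (List.replicate cs.length (0 : Int)) else RT cs t).set c0 x =
      (RT cs t).set c0 x := by
    intro x
    by_cases h : ((RT cs t).getD c0 []).length = 0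
    · rw [if_pos h, List.set_set]
    · rw [if_neg h]
  rw [buildRstep]
  simp only [← hc0]
  rw [hrow, hset]
  have hwhile : whileA ((List.range cs.length).map (nearT cs c0 t)) (Int.ofNat (t + 1)) (t + 1) =
      (List.range cs.length).map (nearT cs c0 (t + 1)) := by
    apply whileA_spec cs c0 t rfl cs.length t
    · simp
    · exact le_rfl
    · intro j hj
      rw [List.getD_eq_getElem ((List.range cs.length).map (nearT cs c0 t)) 0 (by simp; omega)]
      simp
    · intro j hj hjm
      rw [List.getD_eq_getElem ((List.range cs.length).map (nearT cs c0 t)) 0 (by simp [hjm])]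
      simp only [List.getElem_map, List.getElem_range]
      rw [nearT_ge cs c0 t j (by omega), nearT_ge cs c0 (t + 1) j (by omega)]
  rw [hwhile]
  apply List.ext_getElem
  · simp [RT]
  · intro j hj1 hj2
    have hj128 : j < 128 := by simpa [RT] using hj1
    rw [List.getElem_set]
    simp only [RT, List.getElem_map, List.getElem_range]
    by_cases hje : c0 = j
    · subst hje
      have : occB cs (t + 1) c0 = true := by
        rw [occB_succ, decide_eq_true hc0.symm, Bool.or_true]
      simp [this]
    · simp only [hje, if_false]
      have hocc : occB cs (t + 1) j = occB cs t j := by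
        have hne : pvChr cs t ≠ j := hje
        rw [occB_succ, decide_eq_false hne, Bool.or_false]
      rw [hocc]
      have hfun : nearT cs j (t + 1) = nearT cs j t := funext (nearT_succ_other cs j t hje)
      rw [hfun]

lemma foldl_RT (cs : List Char) (hdom : ∀ i, i < cs.length → pvChr cs i < 128) :
    ∀ t, t ≤ cs.length →
      (List.range t).foldl (buildRstep cs cs.length) (List.replicate 128 []) = RT cs t := by
  intro t
  induction t with
  | zero => intro _; simp [RT_zero]
  | succ t ih =>
    intro ht
    rw [List.range_succ, List.foldl_append, ih (by omega)]
    simp only [List.foldl_cons, List.foldl_nil]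
    exact step_RT cs t (by omega) (hdom t (by omega))

-- B's sweep computes the nearT (full pattern) row
lemma sweepB_spec (cs : List Char) (c : Nat) :
    ∀ k, k ≤ cs.length → ∀ acc, sweepB cs c k (nearT cs c cs.length k) acc =
      (List.range k).map (nearT cs c cs.length) ++ acc := by
  intro k
  induction k with
  | zero => intro _ acc; simp [sweepB]
  | succ k ih =>
    intro hk acc
    rw [sweepB]
    have hstep : (if pvChr cs k = c then Int.ofNat (k + 1) else nearT cs c cs.length (k + 1)) =
        nearT cs c cs.length k := by
      conv_rhs => rw [nearT]
      simp [Nat.lt_of_succ_le hk]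
    rw [hstep, ih (by omega), List.range_succ]
    simp

lemma pvChr_eq (cs : List Char) (i : Nat) (h : i < cs.length) : pvChr cs i = cs[i].toNat := by
  unfold pvChr
  rw [List.getD_eq_getElem cs 'a' h]

lemma any_occB (cs : List Char) (c : Nat) :
    (cs.any (fun ch => ch.toNat = c)) = occB cs cs.length c := by
  rw [Bool.eq_iff_iff]
  simp only [List.any_eq_true, occB, List.mem_range, decide_eq_true_eq]
  constructor
  · rintro ⟨ch, hmem, hch⟩
    obtain ⟨i, hi, hget⟩ := List.mem_iff_getElem.1 hmem
    exact ⟨i, hi, by rw [pvChr_eq cs i hi, hget]; exact hch⟩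
  · rintro ⟨i, hi, hch⟩
    refine ⟨cs[i], List.getElem_mem _, ?_⟩
    rw [← pvChr_eq cs i hi]; exact hch

-- ===== VERDICT (by name: the statement is the Claim_ definition above) =====
theorem buildR_spec : Claim_equal_buildR := by
  intro pattern hdom
  unfold Spec_buildR buildR buildR_alt
  set cs := pattern.toList with hcs
  have hdom' : ∀ i, i < cs.length → pvChr cs i < 128 := by
    intro i hi
    have hmem : cs[i] ∈ cs := List.getElem_mem _
    have hall : ∀ ch ∈ cs, pvDomChar ch = true := by
      rw [Dom_buildR, pvDomStr, ← hcs] at hdom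
      exact List.all_eq_true.1 hdom
    have hch := hall _ hmem
    rw [pvDomChar] at hch
    simp only [Bool.or_eq_true, Bool.and_eq_true, decide_eq_true_eq, beq_iff_eq] at hch
    rw [pvChr_eq cs i hi]
    rcases hch with ((⟨h1, h2⟩ | h) | h) | h <;> omega
  rw [foldl_RT cs hdom' cs.length le_rfl]
  apply List.ext_getElem
  · simp [RT]
  · intro j hj1 hj2
    have hj128 : j < 128 := by simpa [RT] using hj1
    simp only [RT, List.getElem_map, List.getElem_range]
    rw [any_occB]
    by_cases hocc : occB cs cs.length j = true
    · simp only [hocc, if_true]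
      have := sweepB_spec cs j cs.length le_rfl []
      rw [nearT_ge cs j cs.length cs.length le_rfl] at this
      simp at this
      rw [this]
    · simp [hocc]
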